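-- pv_equiv track=rewrite | github.com/LTC-117/python-100Days | 9Day/exercise1.py | add_grade
-- ===== SOURCE A (Python) =====
-- def add_grade(orig):
--     target = orig
--
--     for i in orig:
--         if orig[i] in range(0, 70):
--             target[i] = "Fail"
--         elif orig[i] in range(71, 80):
--             target[i] = "Acceptable"
--         elif orig[i] in range(81, 90):
--             target[i] = "Exceeds Expectations"
--         elif orig[i] in range(91, 100):
--             target[i] = "Outstanding"
--     return target
-- ===== SOURCE B (Python) =====
-- def add_grade(orig):
--     # Decade bucketing: the label is computed by integer division, no range membership tests.
--     labels = ["Fail"] * 7 + ["Acceptable", "Exceeds Expectations", "Outstanding"]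
--     for k, v in orig.items():
--         orig[k] = labels[v // 10]
--     return orig
-- ===== Notes on version B (the rewrite author's own statement) =====
-- stated objective: alternative
-- what changed: B classifies each score arithmetically by its decade (v // 10 indexes a 10-entry label list) instead of A's four-way chained range-membership tests; no membership test remains.
-- outside the precondition, e.g. on add_grade({'b': 70}): A returns {'b': 70}, B returns {'b': 'Acceptable'}; on add_grade({'x': 100}): A returns {'x': 100}, B raises IndexError; on add_grade({'d': -3}): A returns {'d': -3}, B returns {'d': 'Outstanding'}
import Mathlib
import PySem

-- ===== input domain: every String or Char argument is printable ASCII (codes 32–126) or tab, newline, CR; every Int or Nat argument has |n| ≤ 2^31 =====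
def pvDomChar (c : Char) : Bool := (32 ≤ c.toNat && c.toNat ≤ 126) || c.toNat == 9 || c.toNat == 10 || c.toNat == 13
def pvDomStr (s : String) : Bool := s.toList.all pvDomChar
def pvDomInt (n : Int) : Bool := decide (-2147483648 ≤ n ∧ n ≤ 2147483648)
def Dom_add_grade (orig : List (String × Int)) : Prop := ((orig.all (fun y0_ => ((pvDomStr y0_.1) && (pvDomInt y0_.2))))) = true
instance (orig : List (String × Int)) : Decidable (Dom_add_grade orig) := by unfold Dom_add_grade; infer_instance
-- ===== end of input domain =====

-- B relabels each entry by decade arithmetic (v // 10 indexes a label list) instead of A's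
-- chained range-membership tests (alternative decomposition, similar cost).  Both Pythons
-- mutate and return the caller's dict; the equivalence proved here is about the returned value.

-- ===== PORT A =====
-- A iterates the keys, reading orig[i] before relabelling key i (each key is read only in its
-- own iteration, so reading the unmutated dict is faithful).  Entries whose value matches no
-- range keep their int value in Python — not a String, excluded by Pre_ — and are rendered via
-- toStr in the initial target here.
def add_grade (orig : List (String × Int)) : List (String × String) :=
  let origD : PySem.Dict String Int := PySem.Dict.mk orig
  let target0 : PySem.Dict String String :=
    PySem.Dict.mk (orig.map (fun p => (p.1, PySem.Int.toStr p.2)))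
  let target := origD.keys.foldl (fun target i =>
      if (PySem.List.pyRange 0 70 1).contains (origD.getD i 0) then target.insert i "Fail"
      else if (PySem.List.pyRange 71 80 1).contains (origD.getD i 0) then target.insert i "Acceptable"
      else if (PySem.List.pyRange 81 90 1).contains (origD.getD i 0) then target.insert i "Exceeds Expectations"
      else if (PySem.List.pyRange 91 100 1).contains (origD.getD i 0) then target.insert i "Outstanding"
      else target) target0
  target.items

-- ===== PORT B =====
-- Source B's labels list: ["Fail"] * 7 + ["Acceptable", "Exceeds Expectations", "Outstanding"]
def labelsB : List String :=
  List.replicate 7 "Fail" ++ ["Acceptable", "Exceeds Expectations", "Outstanding"]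

-- one pass over the items: orig[k] = labels[v // 10]  (an out-of-range decade raises
-- IndexError in Python — outside Pre_ — rendered as "" here)
def add_grade_alt (orig : List (String × Int)) : List (String × String) :=
  orig.map (fun p =>
    (p.1, (PySem.List.pyGet? labelsB (PySem.Int.floordiv p.2 10)).getD ""))

-- ===== PRECONDITION & SPEC =====
-- Pre_ excludes (a) duplicate keys, which a Python dict argument cannot have, and (b) entries
-- whose value lies in none of the four ranges (negative, 70, 80, 90, ≥ 100): on those A returns
-- the int value unchanged, which is not a value of the declared String result type.
def Pre_add_grade (orig : List (String × Int)) : Prop :=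
  (orig.map Prod.fst).Nodup ∧
  ∀ p ∈ orig, (0 ≤ p.2 ∧ p.2 < 70) ∨ (71 ≤ p.2 ∧ p.2 < 80) ∨
              (81 ≤ p.2 ∧ p.2 < 90) ∨ (91 ≤ p.2 ∧ p.2 < 100)
instance (orig : List (String × Int)) : Decidable (Pre_add_grade orig) := by
  unfold Pre_add_grade; infer_instance

def pvWitness_add_grade : (List (String × Int)) := [("Alice", 50), ("Bob", 95)]

def Spec_add_grade (orig : List (String × Int)) (out : List (String × String)) : Prop := out = add_grade_alt orig
instance (orig : List (String × Int)) (out : List (String × String)) : Decidable (Spec_add_grade orig out) := by unfold Spec_add_grade; infer_instance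

-- ===== CLAIM (what is proved, stated in full; the proofs are below) =====
def Claim_equal_add_grade : Prop := ∀ (orig : List (String × Int)), Dom_add_grade orig → Pre_add_grade orig → Spec_add_grade orig (add_grade orig)

-- ===== LEMMAS AND PROOFS =====

-- the label A's if/elif chain assigns (none = A leaves the entry untouched)
def labelA (v : Int) : Option String :=
  if (PySem.List.pyRange 0 70 1).contains v then some "Fail"
  else if (PySem.List.pyRange 71 80 1).contains v then some "Acceptable"
  else if (PySem.List.pyRange 81 90 1).contains v then some "Exceeds Expectations"
  else if (PySem.List.pyRange 91 100 1).contains v then some "Outstanding"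
  else none

theorem contains_pyRange_one (a b v : Int) :
    (PySem.List.pyRange a b 1).contains v = decide (a ≤ v ∧ v < b) := by
  simp [List.contains_eq_mem, PySem.List.mem_pyRange_one]

-- inside the four ranges, A's chained tests assign exactly B's decade label
theorem labelA_eq_decade (v : Int)
    (h : (0 ≤ v ∧ v < 70) ∨ (71 ≤ v ∧ v < 80) ∨ (81 ≤ v ∧ v < 90) ∨ (91 ≤ v ∧ v < 100)) :
    labelA v = some ((PySem.List.pyGet? labelsB (PySem.Int.floordiv v 10)).getD "") := by
  have hd : PySem.Int.floordiv v 10 = v / 10 := PySem.Int.floordiv_eq_ediv_of_pos (by omega)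
  have h0 : 0 ≤ v / 10 := by omega
  rw [hd, PySem.List.pyGet?_of_nonneg (h := h0)]
  have hn : (v / 10).toNat ≤ 9 := by omega
  have hvn : ((v / 10).toNat : Int) = v / 10 := by omega
  set n := (v / 10).toNat with hn'
  interval_cases n <;>
    · simp only [labelsB, List.replicate, List.cons_append, List.nil_append,
        List.getElem?_cons_zero, List.getElem?_cons_succ, Option.getD_some,
        labelA, contains_pyRange_one, decide_eq_true_eq]
      split_ifs <;> first | rfl | omega

theorem step_eq (origD : PySem.Dict String Int) (i : String) (t : PySem.Dict String String) :
    (if (PySem.List.pyRange 0 70 1).contains (origD.getD i 0) then t.insert i "Fail"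
      else if (PySem.List.pyRange 71 80 1).contains (origD.getD i 0) then t.insert i "Acceptable"
      else if (PySem.List.pyRange 81 90 1).contains (origD.getD i 0) then t.insert i "Exceeds Expectations"
      else if (PySem.List.pyRange 91 100 1).contains (origD.getD i 0) then t.insert i "Outstanding"
      else t)
    = match labelA (origD.getD i 0) with
      | some l => t.insert i l
      | none => t := by
  unfold labelA; split_ifs <;> rfl

theorem step_items (origD : PySem.Dict String Int) (i : String)
    (t : PySem.Dict String String) (hci : t.contains i = true) :
    (if (PySem.List.pyRange 0 70 1).contains (origD.getD i 0) then t.insert i "Fail"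
      else if (PySem.List.pyRange 71 80 1).contains (origD.getD i 0) then t.insert i "Acceptable"
      else if (PySem.List.pyRange 81 90 1).contains (origD.getD i 0) then t.insert i "Exceeds Expectations"
      else if (PySem.List.pyRange 91 100 1).contains (origD.getD i 0) then t.insert i "Outstanding"
      else t).items
    = t.items.map (fun p => if p.1 = i then (p.1, (labelA (origD.getD p.1 0)).getD p.2) else p) := by
  rw [step_eq]
  rcases h : labelA (origD.getD i 0) with _ | l
  · refine Eq.symm ((List.map_congr_left (fun p hp => ?_)).trans (List.map_id t.items))
    by_cases hpi : p.1 = i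
    · rw [if_pos hpi, hpi, h]
      show (i, p.2) = p
      rw [← hpi]
    · rw [if_neg hpi]; rfl
  · rw [PySem.Dict.items_insert_of_contains _ _ hci]
    refine List.map_congr_left (fun p hp => ?_)
    by_cases hpi : p.1 = i
    · simp only [hpi, beq_self_eq_true, if_true, h]; rfl
    · simp [hpi]

theorem fold_items (origD : PySem.Dict String Int) (ks : List String)
    (t : PySem.Dict String String) (hnd : ks.Nodup)
    (hc : ∀ i ∈ ks, t.contains i = true) :
    (ks.foldl (fun target i =>
      if (PySem.List.pyRange 0 70 1).contains (origD.getD i 0) then target.insert i "Fail"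
      else if (PySem.List.pyRange 71 80 1).contains (origD.getD i 0) then target.insert i "Acceptable"
      else if (PySem.List.pyRange 81 90 1).contains (origD.getD i 0) then target.insert i "Exceeds Expectations"
      else if (PySem.List.pyRange 91 100 1).contains (origD.getD i 0) then target.insert i "Outstanding"
      else target) t).items
    = t.items.map (fun p => if p.1 ∈ ks then (p.1, (labelA (origD.getD p.1 0)).getD p.2) else p) := by
  induction ks generalizing t with
  | nil => simp
  | cons i ks ih =>
    obtain ⟨hni, hnd'⟩ := List.nodup_cons.mp hnd
    have hci : t.contains i = true := hc i List.mem_cons_self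
    have hc' : ∀ j ∈ ks,
        (if (PySem.List.pyRange 0 70 1).contains (origD.getD i 0) then t.insert i "Fail"
          else if (PySem.List.pyRange 71 80 1).contains (origD.getD i 0) then t.insert i "Acceptable"
          else if (PySem.List.pyRange 81 90 1).contains (origD.getD i 0) then t.insert i "Exceeds Expectations"
          else if (PySem.List.pyRange 91 100 1).contains (origD.getD i 0) then t.insert i "Outstanding"
          else t).contains j = true := by
      intro j hj
      have hj' : t.contains j = true := hc j (List.mem_cons_of_mem _ hj)
      rw [step_eq]
      rcases labelA (origD.getD i 0) with _ | l
      · exact hj'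
      · simp [PySem.Dict.contains_insert, hj']
    rw [List.foldl_cons, ih _ hnd' hc', step_items origD i t hci, List.map_map]
    refine List.map_congr_left (fun p hp => ?_)
    by_cases hpi : p.1 = i
    · have : p.1 ∉ ks := by rw [hpi]; exact hni
      simp [Function.comp, hpi, hni]
    · simp [Function.comp, hpi, List.mem_cons]

theorem getD_mk_of_mem (orig : List (String × Int)) (q : String × Int)
    (hq : q ∈ orig) (hnd : (orig.map Prod.fst).Nodup) :
    (PySem.Dict.mk orig).getD q.1 0 = q.2 := by
  apply PySem.Dict.getD_of_mem_items <;> first | exact hq | exact hnd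

-- ===== VERDICT (by name: the statement is the Claim_ definition above) =====
theorem add_grade_spec : Claim_equal_add_grade := by
  intro orig _ hpre
  obtain ⟨hnd, hrng⟩ := hpre
  unfold Spec_add_grade add_grade add_grade_alt
  have hkeys : (PySem.Dict.mk orig).keys = orig.map Prod.fst := by
    simp [PySem.Dict.keys]
  have hitems0 : (PySem.Dict.mk (orig.map (fun p => (p.1, PySem.Int.toStr p.2)))).items
      = orig.map (fun p => (p.1, PySem.Int.toStr p.2)) := rfl
  have hc : ∀ i ∈ (PySem.Dict.mk orig).keys,
      (PySem.Dict.mk (orig.map (fun p => (p.1, PySem.Int.toStr p.2)))).contains i = true := by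
    intro i hi
    rw [PySem.Dict.contains_eq_decide_mem_keys]
    have : (PySem.Dict.mk (orig.map (fun p => (p.1, PySem.Int.toStr p.2)))).keys
        = orig.map Prod.fst := by
      simp [PySem.Dict.keys]
    rw [this, decide_eq_true_eq]
    rwa [hkeys] at hi
  rw [fold_items (PySem.Dict.mk orig) _ _ (by rw [hkeys]; exact hnd) hc, hitems0, List.map_map]
  refine List.map_congr_left (fun q hq => ?_)
  have hmem : q.1 ∈ (PySem.Dict.mk orig).keys := by
    rw [hkeys]; exact List.mem_map_of_mem hq
  have hget : (PySem.Dict.mk orig).getD q.1 0 = q.2 := getD_mk_of_mem orig q hq hnd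
  rw [hkeys] at hmem
  simp only [Function.comp, hkeys, hmem, if_true, hget, labelA_eq_decade q.2 (hrng q hq),
    Option.getD_some]
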